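-- pv_equiv track=rewrite | github.com/Ariyan20267/VIP-BOT-V10-2DAY | main.py | make_pages
-- ===== SOURCE A (Python) =====
-- def make_pages(emote_list, per_page=20):
--     pages = []
--     message = ""
--     count = 0
--
--     for emote in emote_list:
--         try:
--             name = emote.get("name", "unknown")
--             emote_id = emote.get("id", "0")
--
--             message += f"[FFFFFF]{name} → {emote_id}\n"
--             count += 1
--
--             if count >= per_page:
--                 pages.append(message)
--                 message = ""
--                 count = 0
--
--         except:
--             continue
--
--     if message:
--         pages.append(message)
--
--     return pages
-- ===== SOURCE B (Python) =====
-- def make_pages(emote_list, per_page=20):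
--     lines = []
--     for emote in emote_list:
--         try:
--             lines.append(f"[FFFFFF]{emote.get('name', 'unknown')} \u2192 {emote.get('id', '0')}\n")
--         except:
--             continue
--     size = per_page if per_page > 0 else 1
--     pages = []
--     i = 0
--     while i < len(lines):
--         pages.append("".join(lines[i:i + size]))
--         i += size
--     return pages
-- ===== Notes on version B (the rewrite author's own statement) =====
-- stated objective: alternative
-- what changed: Replaces A's single pass with a running message/count accumulator and end-of-loop flush by two passes: first format all lines, then group them into pages by slicing the line list in strides of the page size (clamped to 1 for non-positive per_page, which reproduces A's one-line-per-page behaviour there).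
import Mathlib
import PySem

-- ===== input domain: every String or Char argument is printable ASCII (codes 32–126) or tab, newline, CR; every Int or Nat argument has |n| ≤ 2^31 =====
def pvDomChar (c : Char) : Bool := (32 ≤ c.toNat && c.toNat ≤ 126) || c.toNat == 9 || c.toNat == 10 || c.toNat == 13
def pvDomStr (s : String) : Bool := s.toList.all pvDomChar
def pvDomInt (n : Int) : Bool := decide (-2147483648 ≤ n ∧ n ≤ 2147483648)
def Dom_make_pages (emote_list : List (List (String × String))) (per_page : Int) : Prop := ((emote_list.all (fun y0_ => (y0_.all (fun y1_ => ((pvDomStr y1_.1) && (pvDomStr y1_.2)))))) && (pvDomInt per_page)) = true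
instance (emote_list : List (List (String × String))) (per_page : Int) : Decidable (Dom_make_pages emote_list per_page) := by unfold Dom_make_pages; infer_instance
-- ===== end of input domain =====

-- B replaces A's running message/count accumulator by two passes (format all lines, then group
-- them in strides of the page size); alternative decomposition, same cost, same return values.


-- ===== PORT A =====
-- Literal port of A: one fold carrying (pages, message, count); the try/except is dead for
-- dict inputs (dict.get never raises), so it is not represented.
def make_pages (emote_list : List (List (String × String))) (per_page : Int) : List String :=
  let r := emote_list.foldl
    (fun (st : List String × String × Int) emote =>
      let name := PySem.Dict.getD (PySem.Dict.mk emote) "name" "unknown"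
      let emote_id := PySem.Dict.getD (PySem.Dict.mk emote) "id" "0"
      let message := st.2.1 ++ ("[FFFFFF]" ++ name ++ " → " ++ emote_id ++ "\n")
      let count := st.2.2 + 1
      if count ≥ per_page then (st.1 ++ [message], "", 0) else (st.1, message, count))
    ([], "", 0)
  if r.2.1 = "" then r.1 else r.1 ++ [r.2.1]

-- ===== PORT B =====
def pvLineB (emote : List (String × String)) : String :=
  "[FFFFFF]" ++ PySem.Dict.getD (PySem.Dict.mk emote) "name" "unknown" ++ " → "
    ++ PySem.Dict.getD (PySem.Dict.mk emote) "id" "0" ++ "\n"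

-- Source B's while loop over i in strides of size: each iteration takes the slice
-- lines[i:i+size] (here: head plus take (size-1) of the tail) and recurses on the rest.
def pvChunkB (k : Nat) : List String → List String
  | [] => []
  | l :: rest => PySem.Str.join "" (l :: rest.take k) :: pvChunkB k (rest.drop k)
  termination_by ls => ls.length
  decreasing_by simp

def make_pages_alt (emote_list : List (List (String × String))) (per_page : Int) : List String :=
  let lines := emote_list.map pvLineB
  let size : Int := if per_page > 0 then per_page else 1
  pvChunkB (size.toNat - 1) lines

-- ===== PRECONDITION & SPEC =====
def Spec_make_pages (emote_list : List (List (String × String))) (per_page : Int) (out : List String) : Prop := out = make_pages_alt emote_list per_page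
instance (emote_list : List (List (String × String))) (per_page : Int) (out : List String) : Decidable (Spec_make_pages emote_list per_page out) := by unfold Spec_make_pages; infer_instance

-- ===== CLAIM (what is proved, stated in full; the proofs are below) =====
def Claim_equal_make_pages : Prop := ∀ (emote_list : List (List (String × String))) (per_page : Int), Dom_make_pages emote_list per_page → Spec_make_pages emote_list per_page (make_pages emote_list per_page)

-- ===== LEMMAS AND PROOFS =====

-- A's loop body, expressed on the already-formatted line.
def pvStepA (per_page : Int) (st : List String × String × Int) (l : String) : List String × String × Int :=
  let message := st.2.1 ++ l
  let count := st.2.2 + 1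
  if count ≥ per_page then (st.1 ++ [message], "", 0) else (st.1, message, count)

def pvFinishA (r : List String × String × Int) : List String :=
  if r.2.1 = "" then r.1 else r.1 ++ [r.2.1]

theorem pvJoin_cons (l : String) (xs : List String) :
    PySem.Str.join "" (l :: xs) = l ++ PySem.Str.join "" xs := by
  cases xs with
  | nil => simp [PySem.Str.join, PySem.Chars.join_singleton, PySem.Chars.join_nil]
  | cons b r => simp [PySem.Str.join, PySem.Chars.join_cons_cons]

theorem pvJoin_nil : PySem.Str.join "" ([] : List String) = "" := by
  simp [PySem.Str.join, PySem.Chars.join_nil]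

theorem pvChunkB_nil (k : Nat) : pvChunkB k [] = [] := by
  unfold pvChunkB
  rfl

theorem pvChunkB_cons (k : Nat) (l : String) (rest : List String) :
    pvChunkB k (l :: rest) =
      PySem.Str.join "" (l :: rest.take k) :: pvChunkB k (rest.drop k) := by
  conv_lhs => unfold pvChunkB

theorem pvLineB_ne (e : List (String × String)) : pvLineB e ≠ "" := by
  intro h
  have hl : (pvLineB e).length = 0 := by rw [h]; rfl
  simp [pvLineB, String.length_append] at hl

theorem pvJoin_cons_ne (l : String) (xs : List String) (hl : l ≠ "") :
    PySem.Str.join "" (l :: xs) ≠ "" := by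
  rw [pvJoin_cons]
  intro h
  have : (l ++ PySem.Str.join "" xs).length = 0 := by rw [h]; rfl
  rw [String.length_append] at this
  exact hl (String.length_eq_zero_iff.mp (by omega))

theorem pvA_as_lines (emote_list : List (List (String × String))) (per_page : Int) :
    make_pages emote_list per_page
      = pvFinishA ((emote_list.map pvLineB).foldl (pvStepA per_page) ([], "", 0)) := by
  simp only [make_pages, pvFinishA, List.foldl_map]
  rfl

theorem pvThr (pp : Int) (s : Nat) (hs : (s : Int) = if pp > 0 then pp else 1)
    (c : Nat) : ((c : Int) + 1 ≥ pp) ↔ (c + 1 ≥ s) := by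
  split at hs <;> omega

-- inner loop lemma: running A's loop from a partially filled page
theorem pvLoop_split (pp : Int) (s : Nat) (hs : (s : Int) = if pp > 0 then pp else 1) :
    ∀ (lines : List String) (pages : List String) (msg : String) (c : Nat), c < s →
      lines.foldl (pvStepA pp) (pages, msg, (c : Int)) =
        if lines.length + c < s
        then (pages, msg ++ PySem.Str.join "" lines, (c : Int) + lines.length)
        else (lines.drop (s - c)).foldl (pvStepA pp)
               (pages ++ [msg ++ PySem.Str.join "" (lines.take (s - c))], "", 0) := by
  intro lines
  induction lines with
  | nil =>
    intro pages msg c hc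
    simp [pvJoin_nil, hc]
  | cons l rest ih =>
    intro pages msg c hc
    have hstep : pvStepA pp (pages, msg, (c : Int)) l =
        if (c : Int) + 1 ≥ pp then (pages ++ [msg ++ l], "", 0)
        else (pages, msg ++ l, (c : Int) + 1) := rfl
    by_cases hfull : c + 1 = s
    · -- page becomes full on this line
      have hge : (c : Int) + 1 ≥ pp := (pvThr pp s hs c).mpr (by omega)
      have hsc : s - c = 1 := by omega
      have hcond : ¬ ((l :: rest).length + c < s) := by simp; omega
      rw [List.foldl_cons, hstep, if_pos hge, if_neg hcond, hsc]
      simp [pvJoin_cons, pvJoin_nil]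
    · -- page not yet full
      have hlt : ¬ ((c : Int) + 1 ≥ pp) := by
        intro h; exact hfull (by have := (pvThr pp s hs c).mp h; omega)
      have hc1 : ((c : Int) + 1) = ((c + 1 : Nat) : Int) := by push_cast; ring
      rw [List.foldl_cons, hstep, if_neg hlt, hc1, ih pages (msg ++ l) (c + 1) (by omega)]
      by_cases hsmall : rest.length + (c + 1) < s
      · rw [if_pos hsmall, if_pos (by simp; omega)]
        rw [pvJoin_cons, ← String.append_assoc]
        refine Prod.ext rfl (Prod.ext rfl ?_)
        simp only [List.length_cons]
        push_cast
        ring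
      · rw [if_neg hsmall, if_neg (by simp; omega)]
        have h1 : s - c = (s - (c + 1)) + 1 := by omega
        rw [h1]
        simp [pvJoin_cons, String.append_assoc]

-- main lemma: A's loop + final flush produce exactly B's chunking of the line list
theorem pvMain (pp : Int) (s : Nat) (hs : (s : Int) = if pp > 0 then pp else 1) :
    ∀ (n : Nat) (lines : List String), lines.length ≤ n → (∀ l ∈ lines, l ≠ "") →
      ∀ pages, pvFinishA (lines.foldl (pvStepA pp) (pages, "", (0 : Int))) =
        pages ++ pvChunkB (s - 1) lines := by
  have hs1 : 1 ≤ s := by split at hs <;> omega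
  intro n
  induction n with
  | zero =>
    intro lines hlen _ pages
    have : lines = [] := List.eq_nil_of_length_eq_zero (by omega)
    subst this
    simp [pvFinishA, pvChunkB_nil]
  | succ n ih =>
    intro lines hlen hne pages
    have h0 := pvLoop_split pp s hs lines pages "" 0 (by omega)
    simp only [Nat.cast_zero] at h0
    rw [h0]
    by_cases hsmall : lines.length + 0 < s
    · rw [if_pos hsmall]
      cases lines with
      | nil => simp [pvFinishA, pvChunkB_nil, pvJoin_nil]
      | cons l rest =>
        have hnel : l ≠ "" := hne l (by simp)
        have hrest : rest.length ≤ s - 1 := by simp at hsmall; omega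
        rw [pvChunkB_cons, List.take_of_length_le hrest, List.drop_eq_nil_of_le hrest, pvChunkB_nil]
        simp [pvFinishA, pvJoin_cons_ne l rest hnel]
    · rw [if_neg hsmall]
      cases lines with
      | nil => simp at hsmall; omega
      | cons l rest =>
        have hlen' : ((l :: rest).drop (s - 0)).length ≤ n := by
          simp at hlen ⊢; omega
        have hne' : ∀ x ∈ (l :: rest).drop (s - 0), x ≠ "" :=
          fun x hx => hne x (List.mem_of_mem_drop hx)
        rw [ih _ hlen' hne']
        have h1 : s - 0 = (s - 1) + 1 := by omega
        rw [h1]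
        simp only [List.take_succ_cons, List.drop_succ_cons]
        rw [pvChunkB_cons]
        simp [pvJoin_cons]

-- ===== VERDICT (by name: the statement is the Claim_ definition above) =====
theorem make_pages_spec : Claim_equal_make_pages := by
  intro emote_list per_page _
  unfold Spec_make_pages
  set s : Nat := (if per_page > 0 then per_page else 1).toNat with hsdef
  have hs : (s : Int) = if per_page > 0 then per_page else 1 := by
    rw [hsdef]; split <;> omega
  have hne : ∀ l ∈ emote_list.map pvLineB, l ≠ "" := by
    intro l hl
    rcases List.mem_map.mp hl with ⟨e, _, rfl⟩
    exact pvLineB_ne e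
  have := pvMain per_page s hs (emote_list.map pvLineB).length (emote_list.map pvLineB)
    le_rfl hne []
  simp only [List.nil_append] at this
  rw [pvA_as_lines, this]
  rfl
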